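-- pv_equiv track=rewrite | github.com/THEOLEX-IO/legal_doc_processing | legal_doc_processing/press_release/structure/sec_model_2.py | split_intro_article_2
-- ===== SOURCE A (Python) =====
-- def _detect_true_text_id(txt_lines: str, line_length_txt=50, n_lines=4) -> int:
--     """ """
--
--     # find a first candidate for a REAL senetence
--     # i, len char the line, the line itself
--     cands_1st = [(i, len(j), j) for i, j in enumerate(txt_lines)]
--
--     # then we want the len of this line, the len of the n+1 line, idem n+2, n+3
--     cands_2nd = [
--         (
--             i,
--             [cands_1st[i + k][1] for k in range(n_lines)],
--             k,
--         )
--         for i, j, k in cands_1st[: -(n_lines + 1)]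
--     ]
--
--     # we want to know if the 3 next lines will be len() > threshold
--     cands_3rd = [(i, sum([kk > line_length_txt for kk in j]), k) for i, j, k in cands_2nd]
--
--     # if not all then True
--     cands_5th = [(i, j, k) for i, j, k in cands_3rd if j >= n_lines]
--
--     if not cands_5th:
--         return -1
--     else:
--         return cands_5th[0][0]
--
-- def split_intro_article_2(txt: str, n=30) -> str:
--     """ """
--
--     txt_other = txt.splitlines()[n:]
--     txt_lines_30 = txt.splitlines()[:n]
--
--     # find v.
--     cand_list = ["SEC v.", "Commission v."]
--     cond_ok = lambda i: any([cand.lower() in i.lower() for cand in cand_list])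
--     idx_v_cands = [i for i, j in enumerate(txt_lines_30) if cond_ok(j)]
--     # logger.info(idx_v_cands)
--
--     # cut v.
--     idx_v_plus_1 = idx_v_cands[0] + 1
--     pre_txt_lines = txt_lines_30[:idx_v_plus_1]
--     post_txt_lines = txt_lines_30[idx_v_plus_1:]
--
--     # true text begins at
--     idx_true_txt = _detect_true_text_id(post_txt_lines)
--
--     A_post_txt_lines = post_txt_lines[:idx_true_txt]
--     B_post_txt_lines = post_txt_lines[idx_true_txt:]
--
--     intro = "\n".join(pre_txt_lines + A_post_txt_lines)
--     article = "\n".join(B_post_txt_lines + txt_other)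
--
--     return intro, article
-- ===== SOURCE B (Python) =====
-- def _first_long_run(lines, line_length_txt=50, n_lines=4):
--     # single backward pass: `run` = number of consecutive long lines starting at i
--     # (suffix run-length), so no inner window loop; the last qualifying i seen
--     # (i.e. the smallest) is the answer.
--     limit = len(lines) - (n_lines + 1)
--     run = 0
--     best = -1
--     for i in range(len(lines) - 1, -1, -1):
--         run = run + 1 if len(lines[i]) > line_length_txt else 0
--         if run >= n_lines and i < limit:
--             best = i
--     return best
--
--
-- def split_intro_article_2(txt, n=30):
--     lines = txt.splitlines()
--     head, tail = lines[:n], lines[n:]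
--     cut = next(i for i, line in enumerate(head)
--                if "sec v." in line.lower() or "commission v." in line.lower()) + 1
--     post = head[cut:]
--     idx = _first_long_run(post)
--     intro = "\n".join(head[:cut] + post[:idx])
--     article = "\n".join(post[idx:] + tail)
--     return intro, article
-- ===== Notes on version B (the rewrite author's own statement) =====
-- stated objective: alternative
-- what changed: A's staged window comprehensions (per-index window slices, 0/1 indicator sums, a filter) are replaced by a suffix run-length dynamic program: one backward pass maintains the count of consecutive long lines starting at each index and keeps the smallest qualifying index, so the inner per-window loop disappears; the first-'v.'-line is found by one counting scan instead of enumerate+filter+index.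
import Mathlib
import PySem

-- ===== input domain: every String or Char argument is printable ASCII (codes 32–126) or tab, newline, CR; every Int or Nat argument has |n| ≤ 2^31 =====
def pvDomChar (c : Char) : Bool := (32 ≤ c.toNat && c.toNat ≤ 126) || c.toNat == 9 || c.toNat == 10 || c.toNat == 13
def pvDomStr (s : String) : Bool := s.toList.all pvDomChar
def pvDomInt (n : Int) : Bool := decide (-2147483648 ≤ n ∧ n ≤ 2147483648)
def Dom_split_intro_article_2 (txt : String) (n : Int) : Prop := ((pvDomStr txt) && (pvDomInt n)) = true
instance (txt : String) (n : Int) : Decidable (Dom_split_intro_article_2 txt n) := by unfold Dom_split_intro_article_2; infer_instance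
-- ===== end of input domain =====

-- B replaces A's staged window comprehensions by a suffix run-length scan (one backward
-- pass, no per-window inner loop) and the enumerate/filter/index chain for the "v." line
-- by one counting scan (objective: alternative). Equivalence is on the return value.

-- ===== PORT A =====
-- any([cand.lower() in i.lower() for cand in cand_list])
def pvCondA (i : String) : Bool :=
  (["SEC v.", "Commission v."].map
    (fun cand => PySem.Str.isIn (PySem.Str.lower cand) (PySem.Str.lower i))).any id

-- _detect_true_text_id ; cands_1st[i+k] is always in range in Python, the pyGetD
-- default is never returned
def detect_true_text_id (txt_lines : List String) (line_length_txt : Int) (n_lines : Int) : Int :=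
  let cands_1st : List (Int × Int × String) :=
    (PySem.List.enumerate txt_lines).map (fun p => (p.1, (PySem.Str.len p.2 : Int), p.2))
  let cands_2nd : List (Int × List Int × String) :=
    (PySem.List.slice cands_1st none (some (-(n_lines + 1)))).map
      (fun p => (p.1,
        (PySem.List.pyRange 0 n_lines 1).map
          (fun k => (PySem.List.pyGetD cands_1st (p.1 + k) (0, 0, "")).2.1),
        p.2.2))
  let cands_3rd : List (Int × Int × String) :=
    cands_2nd.map (fun p =>
      (p.1, (p.2.1.map (fun kk => if kk > line_length_txt then (1 : Int) else 0)).sum, p.2.2))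
  let cands_5th := cands_3rd.filter (fun p => p.2.1 ≥ n_lines)
  if cands_5th.isEmpty then -1 else (PySem.List.pyGetD cands_5th 0 (0, 0, "")).1

def split_intro_article_2 (txt : String) (n : Int) : String × String :=
  let txt_other := PySem.List.slice (PySem.Str.splitlines txt) (some n) none
  let txt_lines_30 := PySem.List.slice (PySem.Str.splitlines txt) none (some n)
  let idx_v_cands :=
    ((PySem.List.enumerate txt_lines_30).filter (fun p => pvCondA p.2)).map (fun p => p.1)
  -- idx_v_cands[0]: IndexError on the empty list, excluded by Pre_
  let idx_v_plus_1 := PySem.List.pyGetD idx_v_cands 0 0 + 1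
  let pre_txt_lines := PySem.List.slice txt_lines_30 none (some idx_v_plus_1)
  let post_txt_lines := PySem.List.slice txt_lines_30 (some idx_v_plus_1) none
  let idx_true_txt := detect_true_text_id post_txt_lines 50 4
  let A_post := PySem.List.slice post_txt_lines none (some idx_true_txt)
  let B_post := PySem.List.slice post_txt_lines (some idx_true_txt) none
  (PySem.Str.join "\n" (pre_txt_lines ++ A_post),
   PySem.Str.join "\n" (B_post ++ txt_other))

-- ===== PORT B =====
def pvCondB (line : String) : Bool :=
  PySem.Str.isIn "sec v." (PySem.Str.lower line) ||
  PySem.Str.isIn "commission v." (PySem.Str.lower line)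

-- next(i for i, line in enumerate(head) if ...): first matching index
def pvFindCut : List String → Int → Option Int
  | [], _ => none
  | l :: rest, i => if pvCondB l then some i else pvFindCut rest (i + 1)

-- backward pass of _first_long_run: state = (run, best)
def first_long_run (lines : List String) (L nl : Int) : Int :=
  let limit := (PySem.List.len lines) - (nl + 1)
  let st := (PySem.List.pyRange ((PySem.List.len lines) - 1) (-1) (-1)).foldl
    (fun (st : Int × Int) i =>
      let run := if (PySem.Str.len (PySem.List.pyGetD lines i "") : Int) > L then st.1 + 1 else 0
      let best := if run ≥ nl && i < limit then i else st.2
      (run, best)) (0, -1)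
  st.2

def split_intro_article_2_alt (txt : String) (n : Int) : String × String :=
  let lines := PySem.Str.splitlines txt
  let head := PySem.List.slice lines none (some n)
  let tail := PySem.List.slice lines (some n) none
  -- next(...) raises StopIteration when no line matches: excluded by Pre_
  let cut := (pvFindCut head 0).getD 0 + 1
  let post := PySem.List.slice head (some cut) none
  let idx := first_long_run post 50 4
  (PySem.Str.join "\n" (PySem.List.slice head none (some cut) ++ PySem.List.slice post none (some idx)),
   PySem.Str.join "\n" (PySem.List.slice post (some idx) none ++ tail))

-- ===== PRECONDITION & SPEC =====
-- Pre_ excludes exactly the inputs where no line among txt.splitlines()[:n] contains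
-- "SEC v." or "Commission v." case-insensitively: there A raises IndexError.
def Pre_split_intro_article_2 (txt : String) (n : Int) : Prop :=
  (PySem.List.slice (PySem.Str.splitlines txt) none (some n)).any
    (fun l => PySem.Str.isIn "sec v." (PySem.Str.lower l) ||
              PySem.Str.isIn "commission v." (PySem.Str.lower l)) = true
instance (txt : String) (n : Int) : Decidable (Pre_split_intro_article_2 txt n) := by
  unfold Pre_split_intro_article_2; infer_instance

def pvWitness_split_intro_article_2 : String × Int := ("SEC v. Foo\nshort line", 30)

def Spec_split_intro_article_2 (txt : String) (n : Int) (out : String × String) : Prop := out = split_intro_article_2_alt txt n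
instance (txt : String) (n : Int) (out : String × String) : Decidable (Spec_split_intro_article_2 txt n out) := by unfold Spec_split_intro_article_2; infer_instance

-- ===== CLAIM (what is proved, stated in full; the proofs are below) =====
def Claim_equal_split_intro_article_2 : Prop := ∀ (txt : String) (n : Int), Dom_split_intro_article_2 txt n → Pre_split_intro_article_2 txt n → Spec_split_intro_article_2 txt n (split_intro_article_2 txt n)

-- ===== LEMMAS AND PROOFS =====

-- proof-side helpers
def pvWindowOk (lines : List String) (L nl : Int) (i : Int) : Bool :=
  (PySem.List.pyRange 0 nl 1).all
    (fun k => (PySem.Str.len (PySem.List.pyGetD lines (i + k) "") : Int) > L)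

def pvRunLen : List String → Int
  | [] => 0
  | l :: r => if (PySem.Str.len l : Int) > 50 then pvRunLen r + 1 else 0

theorem lowerSEC : PySem.Chars.lower ['S','E','C',' ','v','.'] = ['s','e','c',' ','v','.'] := by decide
theorem lowerComm : PySem.Chars.lower ['C','o','m','m','i','s','s','i','o','n',' ','v','.'] = ['c','o','m','m','i','s','s','i','o','n',' ','v','.'] := by decide
theorem condA_eq_condB (l : String) : pvCondA l = pvCondB l := by
  simp [pvCondA, pvCondB, lowerSEC, lowerComm]

theorem findCut_aux (lines : List String) (s : Int) :
    Option.map (fun p => p.1) ((PySem.List.enumerate lines s).find? (fun p => pvCondB p.2))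
      = pvFindCut lines s := by
  induction lines generalizing s with
  | nil => simp [pvFindCut, PySem.List.enumerate_nil]
  | cons l rest ih =>
    simp only [PySem.List.enumerate_cons, List.find?_cons, pvFindCut]
    by_cases h : pvCondB l = true
    · simp [h]
    · simp only [h]; simpa [h] using ih (s+1)

theorem findCut_eq (lines : List String) (s : Int) :
    (((PySem.List.enumerate lines s).filter (fun p => pvCondA p.2)).map (fun p => p.1)).head?
      = pvFindCut lines s := by
  rw [← findCut_aux lines s]
  simp [condA_eq_condB, List.head?_map, List.head?_filter]

theorem findCut_none_iff (lines : List String) (s : Int) :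
    pvFindCut lines s = none ↔ lines.any pvCondB = false := by
  induction lines generalizing s with
  | nil => simp [pvFindCut]
  | cons l rest ih =>
    simp only [pvFindCut, List.any_cons]
    by_cases h : pvCondB l = true <;> simp [h, ih]

-- ===== A-side reduction (as in the window formulation) =====
theorem getLen_eq (lines : List String) (i : Int) (hi : 0 ≤ i) :
    (PySem.List.pyGetD
      ((PySem.List.pyRange 0 (PySem.List.len lines)).map
        (fun j => (j, (PySem.Str.len (PySem.List.pyGetD lines j "") : Int), PySem.List.pyGetD lines j ""))) i ((0:Int), (0:Int), ("":String))).2.1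
      = (PySem.Str.len (PySem.List.pyGetD lines i "") : Int) := by
  rcases lt_or_ge i (lines.length : Int) with h | h
  · have : i = ((i.toNat : Nat) : Int) := by omega
    rw [this, PySem.List.pyGetD_map_pyRange_one _ 0 _ i.toNat _ (by simp [PySem.List.len]; omega)]
    simp
  · have h1 : PySem.List.pyGetD lines i "" = "" := by
      simp [PySem.List.pyGetD, PySem.List.pyGet?, PySem.List.pyIdx?]
      split_ifs <;> simp_all <;> omega
    have h2 : PySem.List.pyGetD
      ((PySem.List.pyRange 0 (PySem.List.len lines)).map
        (fun j => (j, (PySem.Str.len (PySem.List.pyGetD lines j "") : Int), PySem.List.pyGetD lines j ""))) i ((0:Int), (0:Int), ("":String)) = ((0:Int), (0:Int), ("":String)) := by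
      simp [PySem.List.pyGetD, PySem.List.pyGet?, PySem.List.pyIdx?, PySem.List.len]
      split_ifs <;> simp_all <;> omega
    rw [h1, h2]
    decide

theorem pyRange04 : PySem.List.pyRange 0 4 = [0, 1, 2, 3] := by decide

theorem innerList_eq (lines : List String) :
    ((List.range lines.length).map
        (fun j : Nat => ((j : Int), (PySem.Str.len (PySem.List.pyGetD lines (j : Int) "") : Int), PySem.List.pyGetD lines (j : Int) "")))
      = (PySem.List.pyRange 0 (PySem.List.len lines)).map
          (fun j : Int => (j, (PySem.Str.len (PySem.List.pyGetD lines j "") : Int), PySem.List.pyGetD lines j "")) := by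
  simp [PySem.List.len, PySem.List.pyRange_zero_natCast, List.map_map, Function.comp_def]

theorem pointOk (lines : List String) (t : Nat) :
    ((fun p : Int × Int × String => decide (p.2.1 ≥ 4)) ∘ fun x : Nat =>
      ((x : Int),
        (List.map (fun k =>
            if (PySem.List.pyGetD
                ((List.range lines.length).map
                  (fun j : Nat => ((j : Int), (PySem.Str.len (PySem.List.pyGetD lines (j : Int) "") : Int), PySem.List.pyGetD lines (j : Int) "")))
                ((x : Int) + k) ((0:Int), (0:Int), ("":String))).2.1 > 50 then (1:Int) else 0)
          (PySem.List.pyRange 0 4)).sum,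
        PySem.List.pyGetD lines (x : Int) "")) t = pvWindowOk lines 50 4 (t : Int) := by
  simp only [Function.comp_def]
  rw [innerList_eq lines]
  rw [pyRange04]
  simp only [List.map_cons, List.map_nil, List.sum_cons, List.sum_nil]
  simp only [getLen_eq lines ((t:Int) + 0) (by omega), getLen_eq lines ((t:Int) + 1) (by omega),
      getLen_eq lines ((t:Int) + 2) (by omega), getLen_eq lines ((t:Int) + 3) (by omega)]
  simp only [pvWindowOk, pyRange04, List.all_cons, List.all_nil]
  split_ifs <;> simp_all

theorem detect_eq_head (lines : List String) :
    detect_true_text_id lines 50 4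
      = (((List.range (lines.length - 5)).filter
            (fun t : Nat => pvWindowOk lines 50 4 (t : Int))).head?).elim (-1 : Int) (fun t : Nat => (t : Int)) := by
  simp only [detect_true_text_id]
  rw [PySem.List.enumerate_eq_map_pyRange lines ""]
  have hc : List.map (fun p => ((p.1 : Int), PySem.Str.len p.2, p.2))
      (List.map (fun j : Int => (j, PySem.List.pyGetD lines j "")) (PySem.List.pyRange 0 (PySem.List.len lines)))
      = List.map (fun j : Int => (j, (PySem.Str.len (PySem.List.pyGetD lines j "") : Int), PySem.List.pyGetD lines j ""))
          (PySem.List.pyRange 0 (PySem.List.len lines)) := by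
    rw [List.map_map]; rfl
  rw [hc]
  rw [show (-(4 + 1) : Int) = -(5 : Int) from by norm_num]
  rw [PySem.List.slice_to_neg_ofNat _ 5 (by norm_num)]
  simp only [PySem.List.len]
  rw [PySem.List.pyRange_zero_natCast lines.length]
  simp only [List.length_map, List.length_range]
  rw [← List.map_take, ← List.map_take, List.take_range, Nat.min_eq_left (Nat.sub_le _ _)]
  simp only [List.map_map, Function.comp_def]
  rw [List.filter_map]
  rw [List.filter_congr (fun t _ => pointOk lines t)]
  rcases hf : (List.range (lines.length - 5)).filter (fun t : Nat => pvWindowOk lines 50 4 (t : Int)) with _ | ⟨t, ts⟩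
  · simp
  · simp [PySem.List.pyGetD_ofNat']

-- ===== B-side reduction =====
theorem runLen_nonneg (xs : List String) : 0 ≤ pvRunLen xs := by
  induction xs with
  | nil => simp [pvRunLen]
  | cons l r ih => simp only [pvRunLen]; split_ifs <;> omega

-- the fold invariant: state after processing indices i .. len-1 (backwards)
theorem fold_invariant (lines : List String) (limit : Int) (m i : Nat) (him : i + m = lines.length) :
    List.foldr (fun (j : Nat) (st : Int × Int) =>
        ((if (PySem.Str.len (PySem.List.pyGetD lines (j : Int) "") : Int) > 50 then st.1 + 1 else 0),
         (if (if (PySem.Str.len (PySem.List.pyGetD lines (j : Int) "") : Int) > 50 then st.1 + 1 else 0) ≥ 4 && (j : Int) < limit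
          then (j : Int) else st.2))) ((0 : Int), (-1 : Int)) (List.range' i m)
      = (pvRunLen (lines.drop i),
         (((List.range' i m).filter
             (fun j : Nat => decide (pvRunLen (lines.drop j) ≥ 4) && decide ((j : Int) < limit))).head?).elim
           (-1 : Int) (fun t : Nat => (t : Int))) := by
  induction m generalizing i with
  | zero =>
    have : i = lines.length := by omega
    simp [this, pvRunLen, List.drop_length]
  | succ m ih =>
    rw [List.range'_succ, List.foldr_cons, ih (i+1) (by omega)]
    have hi : i < lines.length := by omega
    have hdrop : lines.drop i = lines[i] :: lines.drop (i+1) := List.drop_eq_getElem_cons hi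
    have hget : PySem.List.pyGetD lines (i : Int) "" = lines[i] := by
      rw [PySem.List.pyGetD_eq_getElem lines "" (by omega) (by exact_mod_cast hi)]
      simp
    have hrun : (if (PySem.Str.len (PySem.List.pyGetD lines (i : Int) "") : Int) > 50
        then pvRunLen (lines.drop (i+1)) + 1 else 0) = pvRunLen (lines.drop i) := by
      rw [hget, hdrop]
      simp only [pvRunLen]
    simp only [hrun]
    rw [List.filter_cons]
    by_cases hc : (decide (pvRunLen (lines.drop i) ≥ 4) && decide ((i : Int) < limit)) = true
    · simp only [hc, if_pos]
      have hb : (pvRunLen (lines.drop i) ≥ 4 && (i : Int) < limit) = true := by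
        simp at hc ⊢; exact hc
      simp [hb]
    · simp only [hc]
      have hb : (pvRunLen (lines.drop i) ≥ 4 && (i : Int) < limit) = false := by
        simp at hc ⊢; intro h; simpa using hc h
      simp [hb]

-- runLen ≥ 4 ↔ the four lines starting at j are all long (when they exist)
theorem runLen_window (lines : List String) (j : Nat) (hj : ((j:Int) < (lines.length : Int) - 5)) :
    decide (pvRunLen (lines.drop j) ≥ 4) = pvWindowOk lines 50 4 (j : Nat) := by
  have h4 : j + 4 ≤ lines.length := by omega
  have hget : ∀ k : Nat, (hk : k < 4) → PySem.List.pyGetD lines ((j : Int) + k) "" = lines[j + k]'(by omega) := by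
    intro k hk
    rw [PySem.List.pyGetD_eq_getElem lines "" (by omega) (by push_cast; omega)]
    congr 1 <;> omega
  simp only [pvWindowOk, pyRange04, List.all_cons, List.all_nil, Bool.and_true]
  rw [show ((j:Int) + 0) = ((j:Int) + ((0:Nat):Int)) from by norm_num, hget 0 (by omega)]
  rw [show ((j:Int) + 1) = ((j:Int) + ((1:Nat):Int)) from by norm_num, hget 1 (by omega)]
  rw [show ((j:Int) + 2) = ((j:Int) + ((2:Nat):Int)) from by norm_num, hget 2 (by omega)]
  rw [show ((j:Int) + 3) = ((j:Int) + ((3:Nat):Int)) from by norm_num, hget 3 (by omega)]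
  have hlen : 4 ≤ (lines.drop j).length := by rw [List.length_drop]; omega
  obtain ⟨a, b, c, d, rest, habcd⟩ :
      ∃ a b c d rest, lines.drop j = a :: b :: c :: d :: rest := by
    rcases hd : lines.drop j with _ | ⟨a, _ | ⟨b, _ | ⟨c, _ | ⟨d, rest⟩⟩⟩⟩
    · exfalso; rw [hd] at hlen; simp at hlen
    · exfalso; rw [hd] at hlen; simp at hlen
    · exfalso; rw [hd] at hlen; simp at hlen
    · exfalso; rw [hd] at hlen; simp at hlen
    · exact ⟨a, b, c, d, rest, rfl⟩
  have e0 : lines[j + 0]'(by omega) = a := by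
    have h1 : lines[j + 0]? = some a := by rw [← List.getElem?_drop, habcd]; rfl
    exact (List.getElem_eq_iff _).mpr h1
  have e1 : lines[j + 1]'(by omega) = b := by
    have h1 : lines[j + 1]? = some b := by rw [← List.getElem?_drop, habcd]; rfl
    exact (List.getElem_eq_iff _).mpr h1
  have e2 : lines[j + 2]'(by omega) = c := by
    have h1 : lines[j + 2]? = some c := by rw [← List.getElem?_drop, habcd]; rfl
    exact (List.getElem_eq_iff _).mpr h1
  have e3 : lines[j + 3]'(by omega) = d := by
    have h1 : lines[j + 3]? = some d := by rw [← List.getElem?_drop, habcd]; rfl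
    exact (List.getElem_eq_iff _).mpr h1
  rw [e0, e1, e2, e3, habcd]
  have hr := runLen_nonneg rest
  simp only [pvRunLen]
  split_ifs <;> simp_all <;> omega

-- the two filters give the same list
theorem filters_eq (lines : List String) :
    (List.range' 0 lines.length).filter
        (fun j : Nat => decide (pvRunLen (lines.drop j) ≥ 4) && decide ((j : Int) < (lines.length : Int) - 5))
      = (List.range (lines.length - 5)).filter (fun t : Nat => pvWindowOk lines 50 4 (t : Int)) := by
  rw [← List.range_eq_range']
  have hsplit : List.range lines.length
      = List.range (lines.length - 5)
        ++ (List.range (lines.length - (lines.length - 5))).map (fun x => (lines.length - 5) + x) := by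
    have h : lines.length = (lines.length - 5) + (lines.length - (lines.length - 5)) := by omega
    conv_lhs => rw [h]
    exact List.range_add
  rw [hsplit, List.filter_append]
  have h2 : ((List.range (lines.length - (lines.length - 5))).map
        (fun x => (lines.length - 5) + x)).filter
        (fun j : Nat => decide (pvRunLen (lines.drop j) ≥ 4) && decide ((j : Int) < (lines.length : Int) - 5)) = [] := by
    rw [List.filter_eq_nil_iff]
    intro j hj
    simp only [List.mem_map, List.mem_range] at hj
    obtain ⟨x, hx, rfl⟩ := hj
    simp only [Bool.and_eq_true, decide_eq_true_eq, not_and]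
    intro _
    omega
  rw [h2, List.append_nil]
  refine List.filter_congr ?_
  intro j hj
  simp only [List.mem_range] at hj
  have hj' : (j : Int) < (lines.length : Int) - 5 := by omega
  rw [← runLen_window lines j hj']
  simp [hj']

-- B's first_long_run equals the window formulation
theorem first_long_run_eq (lines : List String) :
    first_long_run lines 50 4
      = (((List.range (lines.length - 5)).filter
            (fun t : Nat => pvWindowOk lines 50 4 (t : Int))).head?).elim (-1 : Int) (fun t : Nat => (t : Int)) := by
  simp only [first_long_run, PySem.List.len]
  rw [PySem.List.pyRange_neg_one_eq_reverse]
  rw [show (-1 + 1 : Int) = 0 from by norm_num,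
      show ((lines.length : Int) - 1 + 1) = (lines.length : Int) from by ring]
  rw [PySem.List.pyRange_zero_natCast, List.foldl_reverse, List.foldr_map, List.range_eq_range']
  refine Eq.trans (congrArg Prod.snd
    (fold_invariant lines ((lines.length : Int) - (4 + 1)) lines.length 0 (by omega))) ?_
  simp only [show ((lines.length : Int) - (4 + 1)) = (lines.length : Int) - 5 from by ring]
  rw [filters_eq]

-- ===== VERDICT (by name: the statement is the Claim_ definition above) =====
theorem split_intro_article_2_spec : Claim_equal_split_intro_article_2 := by
  intro txt n _ hpre
  unfold Spec_split_intro_article_2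
  have hpre' : (PySem.List.slice (PySem.Str.splitlines txt) none (some n)).any pvCondB = true := hpre
  obtain ⟨i, hi⟩ : ∃ i, pvFindCut (PySem.List.slice (PySem.Str.splitlines txt) none (some n)) 0 = some i := by
    rcases h : pvFindCut (PySem.List.slice (PySem.Str.splitlines txt) none (some n)) 0 with _ | i
    · rw [findCut_none_iff] at h
      rw [hpre'] at h
      cases h
    · exact ⟨i, rfl⟩
  have hA : PySem.List.pyGetD
      (((PySem.List.enumerate (PySem.List.slice (PySem.Str.splitlines txt) none (some n))).filter
        (fun p => pvCondA p.2)).map (fun p => p.1)) 0 0 = i := by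
    have hfc := findCut_eq (PySem.List.slice (PySem.Str.splitlines txt) none (some n)) 0
    rw [hi] at hfc
    rcases hL : ((PySem.List.enumerate (PySem.List.slice (PySem.Str.splitlines txt) none (some n))).filter
        (fun p => pvCondA p.2)).map (fun p => p.1) with _ | ⟨a, rest⟩
    · rw [hL] at hfc; cases hfc
    · rw [hL] at hfc
      simp only [List.head?_cons, Option.some.injEq] at hfc
      subst hfc
      rw [hL]
      simp [PySem.List.pyGetD_ofNat']
  simp only [split_intro_article_2, split_intro_article_2_alt]
  rw [hA, hi, detect_eq_head, first_long_run_eq]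
  rfl
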